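-- pv_equiv track=rewrite | github.com/ssllaavv/SoftUni-Courses | PYTHON ADVANCED/Functions Advanced/FUNCTIONS-ADVANCED-EXERCISES/sollutions.py | get_numbers_info
-- ===== SOURCE A (Python) =====
-- def get_numbers_info(nums):
--     positives = [n for n in nums if n > 0]
--     negatives = list(filter(lambda x: x < 0, nums))
--     result = f'{sum(negatives)}\n{sum(positives)}\n'
--
--     if sum(positives) > abs(sum(negatives)):
--         result += "The positives are stronger than the negatives"
--     elif sum(positives) < abs(sum(negatives)):
--         result += "The negatives are stronger than the positives"
--
--     return result
-- ===== SOURCE B (Python) =====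
-- def get_numbers_info(nums):
--     pos_sum = 0
--     neg_sum = 0
--     for n in nums:
--         if n > 0:
--             pos_sum += n
--         elif n < 0:
--             neg_sum += n
--     result = f'{neg_sum}\n{pos_sum}\n'
--     if pos_sum > -neg_sum:
--         result += "The positives are stronger than the negatives"
--     elif pos_sum < -neg_sum:
--         result += "The negatives are stronger than the positives"
--     return result
-- ===== Notes on version B (the rewrite author's own statement) =====
-- stated objective: simpler
-- what changed: Replaces the two intermediate filtered lists and the four repeated sum() calls by a single pass maintaining two scalar accumulators, with -neg_sum instead of abs().
import Mathlib
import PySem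

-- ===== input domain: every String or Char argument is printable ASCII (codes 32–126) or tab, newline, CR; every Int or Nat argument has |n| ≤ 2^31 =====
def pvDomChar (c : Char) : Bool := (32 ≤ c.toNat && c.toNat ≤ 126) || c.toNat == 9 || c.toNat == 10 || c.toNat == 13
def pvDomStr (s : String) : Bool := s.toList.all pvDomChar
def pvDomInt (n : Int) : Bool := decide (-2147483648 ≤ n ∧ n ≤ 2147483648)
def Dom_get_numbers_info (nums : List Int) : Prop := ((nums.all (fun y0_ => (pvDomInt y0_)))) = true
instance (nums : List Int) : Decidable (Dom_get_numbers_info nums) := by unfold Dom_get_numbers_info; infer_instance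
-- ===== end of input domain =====

-- B replaces A's two filtered lists and repeated sums with one accumulating pass over the list (simpler).


-- ===== PORT A =====
def get_numbers_info (nums : List Int) : String :=
  let positives := nums.filter (fun n => n > 0)
  let negatives := nums.filter (fun x => x < 0)
  let result := PySem.Int.toStr negatives.sum ++ "\n" ++ PySem.Int.toStr positives.sum ++ "\n"
  if positives.sum > |negatives.sum| then
    result ++ "The positives are stronger than the negatives"
  else if positives.sum < |negatives.sum| then
    result ++ "The negatives are stronger than the positives"
  else
    result

-- ===== PORT B =====
def get_numbers_info_alt (nums : List Int) : String :=
  let sums := nums.foldl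
    (fun (acc : Int × Int) n =>
      if n > 0 then (acc.1 + n, acc.2)
      else if n < 0 then (acc.1, acc.2 + n)
      else acc) (0, 0)
  let result := PySem.Int.toStr sums.2 ++ "\n" ++ PySem.Int.toStr sums.1 ++ "\n"
  if sums.1 > -sums.2 then
    result ++ "The positives are stronger than the negatives"
  else if sums.1 < -sums.2 then
    result ++ "The negatives are stronger than the positives"
  else
    result

-- ===== PRECONDITION & SPEC =====
def Spec_get_numbers_info (nums : List Int) (out : String) : Prop := out = get_numbers_info_alt nums
instance (nums : List Int) (out : String) : Decidable (Spec_get_numbers_info nums out) := by unfold Spec_get_numbers_info; infer_instance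

-- ===== CLAIM (what is proved, stated in full; the proofs are below) =====
def Claim_equal_get_numbers_info : Prop := ∀ (nums : List Int), Dom_get_numbers_info nums → Spec_get_numbers_info nums (get_numbers_info nums)

-- ===== LEMMAS AND PROOFS =====

theorem pv_fold_sums (nums : List Int) (p q : Int) :
    nums.foldl
      (fun (acc : Int × Int) n =>
        if n > 0 then (acc.1 + n, acc.2)
        else if n < 0 then (acc.1, acc.2 + n)
        else acc) (p, q)
    = (p + (nums.filter (fun n => n > 0)).sum, q + (nums.filter (fun x => x < 0)).sum) := by
  induction nums generalizing p q with
  | nil => simp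
  | cons x xs ih =>
    by_cases hx : x > 0
    · have hx' : ¬ x < 0 := by omega
      simp [List.foldl_cons, hx, hx', ih]
      ring
    · by_cases hx2 : x < 0
      · simp [List.foldl_cons, hx, hx2, ih]
        ring
      · have h0 : x = 0 := by omega
        simp [List.foldl_cons, hx, hx2, ih]

theorem pv_neg_sum_nonpos (nums : List Int) : (nums.filter (fun x => x < 0)).sum ≤ 0 := by
  induction nums with
  | nil => simp
  | cons x xs ih =>
    by_cases hx : x < 0
    · simp [hx]; omega
    · simp [hx, ih]

-- ===== VERDICT (by name: the statement is the Claim_ definition above) =====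
theorem get_numbers_info_spec : Claim_equal_get_numbers_info := by
  intro nums _
  unfold Spec_get_numbers_info get_numbers_info get_numbers_info_alt
  rw [pv_fold_sums]
  have h := pv_neg_sum_nonpos nums
  have habs : |(nums.filter (fun x => x < 0)).sum| = -(nums.filter (fun x => x < 0)).sum :=
    abs_of_nonpos h
  simp [habs]
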